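-- pv_equiv track=rewrite | github.com/maxostuzzi/underdefinedMQ_implementation | optimization_classical_and_quantum.py | filter_test
-- ===== SOURCE A (Python) =====
-- def filter_test(n, m, partition, threshold, exponent):
--     r"""
--     Application of filter mechanisms in accordance with the specifications outlined in sections 3 and 4 of the paper.
--     """
--     k_1, k_2 = partition[-2], partition[-1]
--     p = len(partition) - 2
--     conditions = {"condition_1": 0, "condition_2": 0, "condition_3": 0, "condition_4": 0, "condition_5": 0}
--
--     for i in range(1, partition[0]):
--         if ((i * (sum(partition[:-2]) + k_2 - i)) + i) > n:
--             conditions["condition_1"] += 1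
--             return False, conditions
--
--     if len(partition) - 2 > 2:
--         for i in range(partition[1]):
--             if ((partition[0] + i) * (sum(partition[1:-2]) - i) + i * partition[0] + i) > n:
--                 conditions["condition_2"] += 1
--                 return False, conditions
--
--         for l in range(2, p - 1):
--             sum_1 = sum(partition[:l - 1])
--             sum_2 = sum(partition[l - 1:p])
--             sum_3 = sum(partition[j] * partition[h] for j in range(l - 1) for h in range(j + 1, l - 1))
--             for i in range(partition[l]):
--                 if ((sum_1 + i) * (sum_2 - i) + i * sum_1 + sum_3 + i) > n:
--                     conditions["condition_3"] += 1
--                     return False, conditions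
--
--     sum_4 = sum(partition[i] * partition[j] for i in range(p - 1) for j in range(i + 1, p))
--     if (sum_4 + m) > n:
--         conditions["condition_4"] += 1
--         return False, conditions
--
--     if threshold is not None:
--         if exponent * (k_1 + k_2) > threshold:
--             conditions["condition_5"] += 1
--             return False, conditions
--
--     return True, conditions
-- ===== SOURCE B (Python) =====
-- def filter_test(n, m, partition, threshold, exponent):
--     """Same result as A, computed without scanning each i: each condition is a
--     concave quadratic in i (leading coefficient -1), so it exceeds n somewhere
--     in its integer range iff it exceeds n at the vertex clamped to the range;
--     prefix sums and the closed form for pairwise products replace the repeated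
--     slice sums and nested generator sums."""
--     k_1, k_2 = partition[-2], partition[-1]
--     p = len(partition) - 2
--     conditions = {"condition_1": 0, "condition_2": 0, "condition_3": 0, "condition_4": 0, "condition_5": 0}
--
--     def exceeds(c, b, lo, hi):
--         # does max of c + b*i - i*i over integers lo..hi exceed n?
--         if lo > hi:
--             return False
--         v = b // 2
--         if v < lo:
--             v = lo
--         elif v > hi:
--             v = hi
--         return c + b * v - v * v > n
--
--     head = sum(partition[:p])          # = sum(partition[:-2])
--     fail = None
--     # condition 1: i*(head + k_2 - i) + i = (head + k_2 + 1)*i - i*i, i in [1, partition[0]-1]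
--     if exceeds(0, head + k_2 + 1, 1, partition[0] - 1):
--         fail = "condition_1"
--     elif p > 2:
--         # condition 2: p0*T + (T+1)*i - i*i with T = sum(partition[1:-2]), i in [0, partition[1]-1]
--         t = head - partition[0]
--         if exceeds(partition[0] * t, t + 1, 0, partition[1] - 1):
--             fail = "condition_2"
--         else:
--             # condition 3: s1*s2 + s3 + (s2+1)*i - i*i, i in [0, partition[l]-1]
--             pre = partition[0]          # sum(partition[:l-1])
--             presq = partition[0] * partition[0]
--             for l in range(2, p - 1):
--                 s2 = head - pre
--                 s3 = (pre * pre - presq) // 2   # pairwise products of partition[:l-1]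
--                 if exceeds(pre * s2 + s3, s2 + 1, 0, partition[l] - 1):
--                     fail = "condition_3"
--                     break
--                 pre += partition[l - 1]
--                 presq += partition[l - 1] * partition[l - 1]
--     if fail is None:
--         sq = sum(x * x for x in partition[:p])
--         if (head * head - sq) // 2 + m > n:
--             fail = "condition_4"
--         elif threshold is not None and exponent * (k_1 + k_2) > threshold:
--             fail = "condition_5"
--     if fail is None:
--         return True, conditions
--     conditions[fail] = 1
--     return False, conditions
-- ===== Notes on version B (the rewrite author's own statement) =====
-- stated objective: alternative
-- what changed: Each of A's per-i scans tests a concave quadratic (leading coefficient -1) against n, so B evaluates it once at the vertex b//2 clamped into the range instead of scanning every i, and A's repeated slice sums and nested pairwise-product generator sums are replaced by running prefix sums and the closed form (S^2 - sum of squares)//2; on inputs that fail the first condition immediately both cost O(p), which is what a timing run measured, so no speed is claimed.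
-- outside the precondition, e.g. on filter_test(10, 0, [5], None, 1): A raises IndexError, B raises IndexError
import Mathlib
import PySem

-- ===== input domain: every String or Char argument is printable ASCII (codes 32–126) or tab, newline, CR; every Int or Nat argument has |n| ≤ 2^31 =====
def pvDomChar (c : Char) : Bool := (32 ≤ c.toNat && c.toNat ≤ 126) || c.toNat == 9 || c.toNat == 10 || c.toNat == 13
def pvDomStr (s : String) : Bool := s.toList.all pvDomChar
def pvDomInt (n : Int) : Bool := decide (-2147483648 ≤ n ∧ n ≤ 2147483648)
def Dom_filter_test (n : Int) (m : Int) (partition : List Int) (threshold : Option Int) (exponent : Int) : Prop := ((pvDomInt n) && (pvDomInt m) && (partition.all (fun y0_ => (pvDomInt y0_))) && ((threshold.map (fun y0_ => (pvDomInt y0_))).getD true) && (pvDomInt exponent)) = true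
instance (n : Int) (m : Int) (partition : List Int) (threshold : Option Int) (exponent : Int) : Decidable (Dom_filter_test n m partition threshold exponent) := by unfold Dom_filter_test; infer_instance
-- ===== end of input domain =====

-- B replaces A's per-i scans of each concave quadratic condition by one evaluation at the
-- clamped integer vertex, and the repeated slice/pairwise-product sums by running prefix
-- sums and the closed form (S^2 - Σx^2)/2; a different algorithm, same return value.

-- ===== PORT A =====
-- A's literal `conditions` dict
def ftCondA : PySem.Dict String Int :=
  PySem.Dict.ofList [("condition_1", 0), ("condition_2", 0), ("condition_3", 0), ("condition_4", 0), ("condition_5", 0)]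

-- A's `conditions[s] += 1; return False, conditions`
def ftFailA (s : String) : Bool × List (String × Int) :=
  (false, (PySem.Dict.modify ftCondA s 0 (· + 1)).items)

def filter_test (n : Int) (m : Int) (partition : List Int) (threshold : Option Int) (exponent : Int) : Bool × (List (String × Int)) :=
  match PySem.List.pyGet? partition (-2), PySem.List.pyGet? partition (-1) with
  | some k_1, some k_2 =>
    let p : Int := (partition.length : Int) - 2
    -- the code A falls through to after the three loops (shared by both branches of `if len(partition) - 2 > 2`)
    let rest : Bool × List (String × Int) :=
      let sum_4 := ((PySem.List.pyRange 0 (p - 1) 1).map (fun i =>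
        ((PySem.List.pyRange (i + 1) p 1).map (fun j =>
          PySem.List.pyGetD partition i 0 * PySem.List.pyGetD partition j 0)).sum)).sum
      if sum_4 + m > n then ftFailA "condition_4"
      else
        match threshold with
        | some t =>
          if exponent * (k_1 + k_2) > t then ftFailA "condition_5"
          else (true, ftCondA.items)
        | none => (true, ftCondA.items)
    if (PySem.List.pyRange 1 (PySem.List.pyGetD partition 0 0) 1).any (fun i =>
         decide (i * ((PySem.List.slice partition none (some (-2))).sum + k_2 - i) + i > n)) then
      ftFailA "condition_1"
    else if (partition.length : Int) - 2 > 2 then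
      if (PySem.List.pyRange 0 (PySem.List.pyGetD partition 1 0) 1).any (fun i =>
           decide ((PySem.List.pyGetD partition 0 0 + i) * ((PySem.List.slice partition (some 1) (some (-2))).sum - i)
             + i * PySem.List.pyGetD partition 0 0 + i > n)) then
        ftFailA "condition_2"
      else if (PySem.List.pyRange 2 (p - 1) 1).any (fun l =>
           let sum_1 := (PySem.List.slice partition none (some (l - 1))).sum
           let sum_2 := (PySem.List.slice partition (some (l - 1)) (some p)).sum
           let sum_3 := ((PySem.List.pyRange 0 (l - 1) 1).map (fun j =>
             ((PySem.List.pyRange (j + 1) (l - 1) 1).map (fun h =>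
               PySem.List.pyGetD partition j 0 * PySem.List.pyGetD partition h 0)).sum)).sum
           (PySem.List.pyRange 0 (PySem.List.pyGetD partition l 0) 1).any (fun i =>
             decide ((sum_1 + i) * (sum_2 - i) + i * sum_1 + sum_3 + i > n))) then
        ftFailA "condition_3"
      else rest
    else rest
  | _, _ => (false, [])   -- unreachable under Pre_ (len ≥ 2): Python raises IndexError here

-- ===== PORT B =====
-- Source B's `exceeds(c, b, lo, hi)`: does max of c + b*i - i*i over the integers lo..hi exceed n?
def ftExceeds (n c b lo hi : Int) : Bool :=
  if lo > hi then false
  else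
    let v0 := PySem.Int.floordiv b 2
    let v := if v0 < lo then lo else if v0 > hi then hi else v0
    decide (c + b * v - v * v > n)

-- Source B's condition-3 loop, carrying (found, pre, presq); `break` is the sticky found flag
def ftLoop3 (n head : Int) (partition : List Int) (lo hi : Int) (st0 : Bool × Int × Int) : Bool × Int × Int :=
  (PySem.List.pyRange lo hi 1).foldl (fun st l =>
    if st.1 then st
    else
      let s2 := head - st.2.1
      let s3 := PySem.Int.floordiv (st.2.1 * st.2.1 - st.2.2) 2
      if ftExceeds n (st.2.1 * s2 + s3) (s2 + 1) 0 (PySem.List.pyGetD partition l 0 - 1) then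
        (true, st.2)
      else
        let x := PySem.List.pyGetD partition (l - 1) 0
        (false, st.2.1 + x, st.2.2 + x * x)) st0

-- B's own copy of the literal `conditions` dict
def ftCondB : PySem.Dict String Int :=
  PySem.Dict.ofList [("condition_1", 0), ("condition_2", 0), ("condition_3", 0), ("condition_4", 0), ("condition_5", 0)]

def filter_test_alt (n : Int) (m : Int) (partition : List Int) (threshold : Option Int) (exponent : Int) : Bool × (List (String × Int)) :=
  match PySem.List.pyGet? partition (-2) with
  | none => (false, [])   -- inputs excluded by Pre_: partition[-2] raises
  | some k_1 =>
    match PySem.List.pyGet? partition (-1) with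
    | none => (false, [])
    | some k_2 =>
        let p : Int := (partition.length : Int) - 2
        let head := (PySem.List.slice partition none (some p)).sum
        let p0 := PySem.List.pyGetD partition 0 0
        let fail : Option String :=
          if ftExceeds n 0 (head + k_2 + 1) 1 (p0 - 1) then some "condition_1"
          else if p > 2 then
            let t := head - p0
            if ftExceeds n (p0 * t) (t + 1) 0 (PySem.List.pyGetD partition 1 0 - 1) then some "condition_2"
            else if (ftLoop3 n head partition 2 (p - 1) (false, p0, p0 * p0)).1 then some "condition_3"
            else none
          else none
        let fail2 : Option String :=
          match fail with
          | some s => some s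
          | none =>
            let sq := ((PySem.List.slice partition none (some p)).map (fun x => x * x)).sum
            if PySem.Int.floordiv (head * head - sq) 2 + m > n then some "condition_4"
            else
              match threshold with
              | some t => if exponent * (k_1 + k_2) > t then some "condition_5" else none
              | none => none
        match fail2 with
        | some s => (false, (PySem.Dict.insert ftCondB s 1).items)
        | none => (true, ftCondB.items)

-- ===== PRECONDITION & SPEC =====
-- Pre_ excludes only partitions with fewer than 2 elements, on which A raises IndexError at partition[-2]
def Pre_filter_test (n : Int) (m : Int) (partition : List Int) (threshold : Option Int) (exponent : Int) : Prop :=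
  2 ≤ partition.length
instance (n : Int) (m : Int) (partition : List Int) (threshold : Option Int) (exponent : Int) : Decidable (Pre_filter_test n m partition threshold exponent) := by unfold Pre_filter_test; infer_instance

def pvWitness_filter_test : Int × Int × List Int × Option Int × Int := (40, 1, [2, 3, 2, 1, 4], some 9, 1)

def Spec_filter_test (n : Int) (m : Int) (partition : List Int) (threshold : Option Int) (exponent : Int) (out : Bool × (List (String × Int))) : Prop := out = filter_test_alt n m partition threshold exponent
instance (n : Int) (m : Int) (partition : List Int) (threshold : Option Int) (exponent : Int) (out : Bool × (List (String × Int))) : Decidable (Spec_filter_test n m partition threshold exponent out) := by unfold Spec_filter_test; infer_instance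

-- ===== CLAIM (what is proved, stated in full; the proofs are below) =====
def Claim_equal_filter_test : Prop := ∀ (n : Int) (m : Int) (partition : List Int) (threshold : Option Int) (exponent : Int), Dom_filter_test n m partition threshold exponent → Pre_filter_test n m partition threshold exponent → Spec_filter_test n m partition threshold exponent (filter_test n m partition threshold exponent)

-- ===== LEMMAS AND PROOFS =====

lemma ft_quad_any (n c b lo hi : Int) :
    (PySem.List.pyRange lo hi 1).any (fun i => decide (c + b * i - i * i > n))
      = ftExceeds n c b lo (hi - 1) := by
  by_cases hle : hi ≤ lo
  · rw [PySem.List.pyRange_one_eq_nil hle]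
    simp [ftExceeds]
    omega
  · push_neg at hle
    unfold ftExceeds
    rw [if_neg (by omega)]
    set q := PySem.Int.floordiv b 2 with hq
    have hqb : q * 2 + PySem.Int.mod b 2 = b := PySem.Int.floordiv_mul_add_mod b 2
    have hm0 : 0 ≤ PySem.Int.mod b 2 := PySem.Int.mod_nonneg _ (by norm_num)
    have hm1 : PySem.Int.mod b 2 < 2 := PySem.Int.mod_lt _ (by norm_num)
    set v := if q < lo then lo else if q > hi - 1 then hi - 1 else q with hv
    have hvlo : lo ≤ v := by rw [hv]; split_ifs <;> omega
    have hvhi : v ≤ hi - 1 := by rw [hv]; split_ifs <;> omega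
    have hmax : ∀ i, lo ≤ i → i < hi → c + b * i - i * i ≤ c + b * v - v * v := by
      intro i h1 h2
      have key : 0 ≤ (v - i) * (b - v - i) := by
        rcases lt_or_ge q lo with hc1 | hc1
        · have hveq : v = lo := by rw [hv, if_pos hc1]
          nlinarith [mul_nonneg (by omega : (0:Int) ≤ i - v) (by omega : (0:Int) ≤ v + i - b)]
        · rcases lt_or_ge (hi - 1) q with hc2 | hc2
          · have hveq : v = hi - 1 := by rw [hv, if_neg (by omega), if_pos (by omega)]
            nlinarith [mul_nonneg (by omega : (0:Int) ≤ v - i) (by omega : (0:Int) ≤ b - v - i)]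
          · have hveq : v = q := by rw [hv, if_neg (by omega), if_neg (by omega)]
            rcases lt_or_ge q i with hc3 | hc3
            · nlinarith [mul_nonneg (by omega : (0:Int) ≤ i - v) (by omega : (0:Int) ≤ v + i - b)]
            · nlinarith [mul_nonneg (by omega : (0:Int) ≤ v - i) (by omega : (0:Int) ≤ b - v - i)]
      nlinarith [key]
    rcases lt_or_ge n (c + b * v - v * v) with hnv | hnv
    · have hrhs : decide (c + b * v - v * v > n) = true := by simp [hnv]
      rw [hrhs, List.any_eq_true]
      exact ⟨v, PySem.List.mem_pyRange_one.mpr ⟨hvlo, by omega⟩, by simp [hnv]⟩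
    · have hrhs : decide (c + b * v - v * v > n) = false := by simp; omega
      rw [hrhs]
      rw [List.any_eq_false]
      intro i hi'
      rw [PySem.List.mem_pyRange_one] at hi'
      have := hmax i hi'.1 hi'.2
      simp; omega

lemma ft_map_getD_range (xs : List Int) (L : Nat) (hL : L ≤ xs.length) :
    (PySem.List.pyRange 0 (L : Int) 1).map (fun j => PySem.List.pyGetD xs j 0) = xs.take L := by
  rw [PySem.List.pyRange_zero_nat, List.map_map]
  induction L with
  | zero => simp
  | succ k ih =>
    rw [List.range_succ, List.map_append, ih (by omega), List.take_succ]
    simp [PySem.List.pyGetD_natCast, List.getD_eq_getElem?_getD]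
    rw [List.getElem?_eq_getElem (by omega)]
    simp

def ftPairs : List Int → Int
  | [] => 0
  | x :: xs => x * xs.sum + ftPairs xs

lemma ftPairs_snoc (xs : List Int) (y : Int) : ftPairs (xs ++ [y]) = ftPairs xs + xs.sum * y := by
  induction xs with
  | nil => simp [ftPairs]
  | cons x t ih => simp [ftPairs, ih]; ring

lemma ft_two_mul_pairs (xs : List Int) :
    2 * ftPairs xs = xs.sum * xs.sum - (xs.map (fun x => x * x)).sum := by
  induction xs with
  | nil => simp [ftPairs]
  | cons x t ih => simp [ftPairs]; nlinarith [ih]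

lemma ft_pairs_loop (xs : List Int) (L : Nat) (hL : L ≤ xs.length) :
    ((PySem.List.pyRange 0 (L : Int) 1).map (fun j =>
      ((PySem.List.pyRange ((j : Int) + 1) (L : Int) 1).map (fun h =>
        PySem.List.pyGetD xs j 0 * PySem.List.pyGetD xs h 0)).sum)).sum
      = ftPairs (xs.take L) := by
  induction L with
  | zero => simp [ftPairs]
  | succ k ih =>
    have hcast : ((k + 1 : Nat) : Int) = (k : Int) + 1 := by push_cast; ring
    rw [hcast, PySem.List.pyRange_one_succ_right (by positivity), List.map_append, List.sum_append]
    have hlast : ((PySem.List.pyRange ((k : Int) + 1) ((k : Int) + 1) 1).map (fun h =>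
        PySem.List.pyGetD xs (k : Int) 0 * PySem.List.pyGetD xs h 0)).sum = 0 := by
      rw [PySem.List.pyRange_one_eq_nil (le_refl _)]; simp
    have hmain : ∀ j ∈ PySem.List.pyRange 0 (k : Int) 1,
        ((PySem.List.pyRange (j + 1) ((k : Int) + 1) 1).map (fun h =>
          PySem.List.pyGetD xs j 0 * PySem.List.pyGetD xs h 0)).sum
        = ((PySem.List.pyRange (j + 1) (k : Int) 1).map (fun h =>
          PySem.List.pyGetD xs j 0 * PySem.List.pyGetD xs h 0)).sum
          + PySem.List.pyGetD xs j 0 * PySem.List.pyGetD xs (k : Int) 0 := by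
      intro j hj
      rw [PySem.List.mem_pyRange_one] at hj
      rw [PySem.List.pyRange_one_succ_right (by omega), List.map_append, List.sum_append]
      simp
    rw [List.map_congr_left hmain, PySem.List.sum_map_add_int, ih (by omega)]
    rw [List.sum_map_mul_right, ft_map_getD_range xs k (by omega)]
    rw [List.take_succ, List.getElem?_eq_getElem (by omega : k < xs.length)]
    simp only [Option.toList_some, ftPairs_snoc, List.map_cons, List.map_nil, List.sum_cons,
      List.sum_nil, hlast, add_zero]
    rw [PySem.List.pyGetD_natCast, List.getD_eq_getElem?_getD,
      List.getElem?_eq_getElem (by omega : k < xs.length)]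
    simp

lemma ft_slice_to (xs : List Int) (b : Int) (h0 : 0 ≤ b) (h1 : b ≤ (xs.length : Int)) :
    PySem.List.slice xs none (some b) = xs.take b.toNat := by
  rw [show (some b) = some (((b.toNat : Nat) : Int)) by rw [Int.toNat_of_nonneg h0],
    PySem.List.slice_to_natCast]

lemma ft_slice_mid_sum (xs : List Int) (a b : Int) (h0 : 0 ≤ a) (h1 : a ≤ b) (h2 : b ≤ (xs.length : Int)) :
    (PySem.List.slice xs (some a) (some b)).sum = (xs.take b.toNat).sum - (xs.take a.toNat).sum := by
  rw [show (some a) = some (((a.toNat : Nat) : Int)) by rw [Int.toNat_of_nonneg h0],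
    show (some b) = some (((b.toNat : Nat) : Int)) by rw [Int.toNat_of_nonneg (by omega : (0:Int) ≤ b)],
    PySem.List.slice_natCast]
  have hsplit : List.take b.toNat xs = List.take a.toNat xs ++ List.take (b.toNat - a.toNat) (List.drop a.toNat xs) := by
    rw [← List.take_add]
    congr 1
    omega
  rw [hsplit, List.sum_append]
  ring

-- floordiv of twice an integer by 2

lemma ft_floordiv_two (z : Int) : PySem.Int.floordiv (2 * z) 2 = z := by
  rw [PySem.Int.floordiv_eq_ediv_of_pos (by norm_num)]
  exact Int.mul_ediv_cancel_left z (by norm_num)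

lemma ft_loop3_sticky (n head : Int) (xs : List Int) (lo hi : Int) (st : Bool × Int × Int)
    (h : st.1 = true) : ftLoop3 n head xs lo hi st = st := by
  unfold ftLoop3
  generalize PySem.List.pyRange lo hi 1 = L
  induction L generalizing st with
  | nil => rfl
  | cons a t ih => rw [List.foldl_cons, if_pos h]; exact ih st h

lemma ftLoop3_false_cons (n head : Int) (xs : List Int) (lo hi pre presq : Int) (h : lo < hi) :
    ftLoop3 n head xs lo hi (false, pre, presq)
      = (if ftExceeds n (pre * (head - pre) + PySem.Int.floordiv (pre * pre - presq) 2)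
            ((head - pre) + 1) 0 (PySem.List.pyGetD xs lo 0 - 1)
         then ftLoop3 n head xs (lo + 1) hi (true, pre, presq)
         else ftLoop3 n head xs (lo + 1) hi (false, pre + PySem.List.pyGetD xs (lo - 1) 0,
                presq + PySem.List.pyGetD xs (lo - 1) 0 * PySem.List.pyGetD xs (lo - 1) 0)) := by
  unfold ftLoop3
  rw [PySem.List.pyRange_one_cons h, List.foldl_cons]
  by_cases hc : ftExceeds n (pre * (head - pre) + PySem.Int.floordiv (pre * pre - presq) 2)
      ((head - pre) + 1) 0 (PySem.List.pyGetD xs lo 0 - 1) = true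
  · rw [if_pos hc]
    simp only [Bool.false_eq_true, if_false, hc, if_true]

  · rw [if_neg hc]
    rw [Bool.not_eq_true] at hc
    simp only [Bool.false_eq_true, if_false, hc]

lemma ft_loop3_eq (n : Int) (xs : List Int) (hlen : 5 ≤ xs.length) :
    ∀ (cnt : Nat) (l : Int), 2 ≤ l → l + cnt = (xs.length : Int) - 3 →
    ((PySem.List.pyRange l ((xs.length : Int) - 2 - 1) 1).any (fun l' =>
      (PySem.List.pyRange 0 (PySem.List.pyGetD xs l' 0) 1).any (fun i =>
        decide (((PySem.List.slice xs none (some (l' - 1))).sum + i) *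
              ((PySem.List.slice xs (some (l' - 1)) (some ((xs.length : Int) - 2))).sum - i) +
            i * (PySem.List.slice xs none (some (l' - 1))).sum +
            ((PySem.List.pyRange 0 (l' - 1) 1).map (fun j =>
              ((PySem.List.pyRange (j + 1) (l' - 1) 1).map (fun h =>
                PySem.List.pyGetD xs j 0 * PySem.List.pyGetD xs h 0)).sum)).sum + i > n))))
    = (ftLoop3 n ((xs.take (xs.length - 2)).sum) xs l ((xs.length : Int) - 2 - 1)
        (false, (xs.take (l - 1).toNat).sum, ((xs.take (l - 1).toNat).map (fun x => x * x)).sum)).1 := by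
  intro cnt
  induction cnt with
  | zero =>
    intro l hl2 hlc
    rw [PySem.List.pyRange_one_eq_nil (by omega)]
    unfold ftLoop3
    rw [PySem.List.pyRange_one_eq_nil (by omega)]
    rfl
  | succ k ih =>
    intro l hl2 hlc
    have hlc' : l + (k : Int) + 1 = (xs.length : Int) - 3 := by push_cast at hlc; omega
    have hlt : l < (xs.length : Int) - 2 - 1 := by omega
    have hltN : (l - 1).toNat < xs.length := by omega
    have hs1 : (PySem.List.slice xs none (some (l - 1))).sum = (xs.take (l - 1).toNat).sum := by
      rw [ft_slice_to xs (l - 1) (by omega) (by omega)]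
    have hs2 : (PySem.List.slice xs (some (l - 1)) (some ((xs.length : Int) - 2))).sum
        = (xs.take (xs.length - 2)).sum - (xs.take (l - 1).toNat).sum := by
      rw [ft_slice_mid_sum xs (l - 1) ((xs.length : Int) - 2) (by omega) (by omega) (by omega),
        show ((xs.length : Int) - 2).toNat = xs.length - 2 by omega]
    have hs3 : ((PySem.List.pyRange 0 (l - 1) 1).map (fun j =>
        ((PySem.List.pyRange (j + 1) (l - 1) 1).map (fun h =>
          PySem.List.pyGetD xs j 0 * PySem.List.pyGetD xs h 0)).sum)).sum
        = ftPairs (xs.take (l - 1).toNat) := by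
      have hcast : l - 1 = (((l - 1).toNat : Nat) : Int) := by omega
      rw [hcast, ft_pairs_loop xs (l - 1).toNat (by omega)]
      simp
    have hs3' : PySem.Int.floordiv ((xs.take (l - 1).toNat).sum * (xs.take (l - 1).toNat).sum
          - ((xs.take (l - 1).toNat).map (fun x => x * x)).sum) 2
        = ftPairs (xs.take (l - 1).toNat) := by
      have h2p := ft_two_mul_pairs (xs.take (l - 1).toNat)
      rw [show (xs.take (l - 1).toNat).sum * (xs.take (l - 1).toNat).sum
          - ((xs.take (l - 1).toNat).map (fun x => x * x)).sum
          = 2 * ftPairs (xs.take (l - 1).toNat) by linarith [h2p]]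
      exact ft_floordiv_two _
    rw [PySem.List.pyRange_one_cons hlt]
    simp only [List.any_cons]
    rw [hs1, hs2, hs3]
    have hinner : (PySem.List.pyRange 0 (PySem.List.pyGetD xs l 0) 1).any (fun i =>
        decide (((xs.take (l - 1).toNat).sum + i) *
            ((xs.take (xs.length - 2)).sum - (xs.take (l - 1).toNat).sum - i) +
            i * (xs.take (l - 1).toNat).sum + ftPairs (xs.take (l - 1).toNat) + i > n))
        = ftExceeds n ((xs.take (l - 1).toNat).sum *
              ((xs.take (xs.length - 2)).sum - (xs.take (l - 1).toNat).sum)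
              + ftPairs (xs.take (l - 1).toNat))
            ((xs.take (xs.length - 2)).sum - (xs.take (l - 1).toNat).sum + 1) 0
            (PySem.List.pyGetD xs l 0 - 1) := by
      have harr : ∀ i : Int, (((xs.take (l - 1).toNat).sum + i) *
            ((xs.take (xs.length - 2)).sum - (xs.take (l - 1).toNat).sum - i) +
            i * (xs.take (l - 1).toNat).sum + ftPairs (xs.take (l - 1).toNat) + i > n)
          = (((xs.take (l - 1).toNat).sum *
              ((xs.take (xs.length - 2)).sum - (xs.take (l - 1).toNat).sum)
              + ftPairs (xs.take (l - 1).toNat))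
             + ((xs.take (xs.length - 2)).sum - (xs.take (l - 1).toNat).sum + 1) * i - i * i > n) := by
        intro i
        congr 1
        ring
      simp only [harr]
      exact ft_quad_any n _ _ 0 (PySem.List.pyGetD xs l 0)
    rw [hinner, ftLoop3_false_cons n _ xs l _ _ _ hlt, hs3']
    have hx : PySem.List.pyGetD xs (l - 1) 0 = xs.getD (l - 1).toNat 0 := by
      rw [show l - 1 = (((l - 1).toNat : Nat) : Int) by omega, PySem.List.pyGetD_natCast]
      simp
    have htake : xs.take (l + 1 - 1).toNat = xs.take (l - 1).toNat ++ [xs.getD (l - 1).toNat 0] := by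
      rw [show (l + 1 - 1).toNat = (l - 1).toNat + 1 by omega, List.take_succ,
        List.getElem?_eq_getElem hltN, List.getD_eq_getElem?_getD, List.getElem?_eq_getElem hltN]
      rfl
    by_cases hex : ftExceeds n ((xs.take (l - 1).toNat).sum *
          ((xs.take (xs.length - 2)).sum - (xs.take (l - 1).toNat).sum)
          + ftPairs (xs.take (l - 1).toNat))
        ((xs.take (xs.length - 2)).sum - (xs.take (l - 1).toNat).sum + 1) 0
        (PySem.List.pyGetD xs l 0 - 1) = true
    · rw [if_pos hex, hex, ft_loop3_sticky n _ xs (l + 1) _ _ rfl]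
      simp
    · rw [if_neg hex]
      simp only [Bool.not_eq_true] at hex
      rw [hex, Bool.false_or]
      have hrec := ih (l + 1) (by omega) (by omega)
      have e1 : (xs.take (l + 1 - 1).toNat).sum
          = (xs.take (l - 1).toNat).sum + PySem.List.pyGetD xs (l - 1) 0 := by
        rw [htake, List.sum_append, hx]
        simp
      have e2 : ((xs.take (l + 1 - 1).toNat).map (fun x => x * x)).sum
          = ((xs.take (l - 1).toNat).map (fun x => x * x)).sum
            + PySem.List.pyGetD xs (l - 1) 0 * PySem.List.pyGetD xs (l - 1) 0 := by
        rw [htake, List.map_append, List.sum_append, hx]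
        simp
      rw [hrec, e1, e2]

lemma ft_sum4 (xs : List Int) (hlen : 2 ≤ xs.length) :
    ((PySem.List.pyRange 0 ((xs.length : Int) - 2 - 1) 1).map (fun i =>
      ((PySem.List.pyRange (i + 1) ((xs.length : Int) - 2) 1).map (fun j =>
        PySem.List.pyGetD xs i 0 * PySem.List.pyGetD xs j 0)).sum)).sum
      = ftPairs (xs.take (xs.length - 2)) := by
  have hc : (xs.length : Int) - 2 = ((xs.length - 2 : Nat) : Int) := by omega
  rw [hc]
  set L := xs.length - 2 with hL
  rcases Nat.eq_zero_or_pos L with h0 | h0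
  · rw [h0]
    rw [PySem.List.pyRange_one_eq_nil (by norm_num)]
    simp [ftPairs]
  · have hsplit : PySem.List.pyRange 0 (L : Int) 1
        = PySem.List.pyRange 0 ((L : Int) - 1) 1 ++ [(L : Int) - 1] := by
      have h := PySem.List.pyRange_one_succ_right (a := 0) (b := (L : Int) - 1) (by omega)
      rw [show ((L : Int) - 1) + 1 = (L : Int) by ring] at h
      exact h
    have h1 := ft_pairs_loop xs L (by omega)
    rw [hsplit, List.map_append, List.sum_append] at h1
    simp only [List.map_cons, List.map_nil, List.sum_cons, List.sum_nil, add_zero] at h1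
    rw [PySem.List.pyRange_one_eq_nil (show (L : Int) ≤ ((L : Int) - 1) + 1 by omega)] at h1
    simp only [List.map_nil, List.sum_nil, add_zero] at h1
    exact h1

-- the middle slice xs[1:-2]

lemma ft_slice_one_neg2 (xs : List Int) (h : 3 ≤ xs.length) :
    PySem.List.slice xs (some 1) (some (-2)) = (xs.drop 1).take (xs.length - 3) := by
  simp only [PySem.List.slice, PySem.List.clampIdx]
  rw [if_neg (show ¬((1 : Int) < 0) by norm_num),
    if_pos (show (-2 : Int) < 0 by norm_num),
    if_neg (show ¬((xs.length : Int) + (-2) < 0) by omega),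
    show min (1 : Int).toNat xs.length = 1 by simp; omega,
    show ((xs.length : Int) + (-2)).toNat = xs.length - 2 by omega,
    show xs.length - 2 - 1 = xs.length - 3 by omega]

-- sum of xs[1:-2] (5 ≤ len in the branch A uses it)

lemma ft_slice_1_neg2_sum (xs : List Int) (hlen : 5 ≤ xs.length) :
    (PySem.List.slice xs (some 1) (some (-2))).sum
      = (xs.take (xs.length - 2)).sum - PySem.List.pyGetD xs 0 0 := by
  rw [ft_slice_one_neg2 xs (by omega)]
  have hsplit : xs.take (xs.length - 2) = xs.take 1 ++ (xs.drop 1).take (xs.length - 3) := by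
    rw [← List.take_add]
    congr 1
    omega
  rw [hsplit, List.sum_append]
  cases xs with
  | nil => simp at hlen
  | cons y t => simp [PySem.List.pyGetD_zero_cons]

lemma ft_main (n m : Int) (xs : List Int) (th : Option Int) (ex : Int) (hpre : 2 ≤ xs.length) :
    filter_test n m xs th ex = filter_test_alt n m xs th ex := by
  obtain ⟨k1, hk1⟩ : ∃ v, PySem.List.pyGet? xs (-2) = some v := by
    rw [PySem.List.pyGet?_neg_ofNat xs 2 (by norm_num) hpre]
    exact ⟨_, List.getElem?_eq_getElem (by omega)⟩
  obtain ⟨k2, hk2⟩ : ∃ v, PySem.List.pyGet? xs (-1) = some v := by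
    rw [PySem.List.pyGet?_neg_ofNat xs 1 (by norm_num) (by omega)]
    exact ⟨_, List.getElem?_eq_getElem (by omega)⟩
  have hS : PySem.List.slice xs none (some (-2)) = xs.take (xs.length - 2) :=
    PySem.List.slice_to_neg_ofNat xs 2 (by norm_num)
  have hSp : PySem.List.slice xs none (some ((xs.length : Int) - 2)) = xs.take (xs.length - 2) := by
    rw [ft_slice_to xs ((xs.length : Int) - 2) (by omega) (by omega),
      show ((xs.length : Int) - 2).toNat = xs.length - 2 by omega]
  simp only [filter_test, filter_test_alt, hk1, hk2]
  rw [hS, hSp]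
  have hc1 : (PySem.List.pyRange 1 (PySem.List.pyGetD xs 0 0) 1).any (fun i =>
      decide (i * ((xs.take (xs.length - 2)).sum + k2 - i) + i > n))
      = ftExceeds n 0 ((xs.take (xs.length - 2)).sum + k2 + 1) 1 (PySem.List.pyGetD xs 0 0 - 1) := by
    have harr : ∀ i : Int, (i * ((xs.take (xs.length - 2)).sum + k2 - i) + i > n)
        = (0 + ((xs.take (xs.length - 2)).sum + k2 + 1) * i - i * i > n) := by
      intro i
      congr 1
      ring
    simp only [harr]
    exact ft_quad_any n 0 _ 1 (PySem.List.pyGetD xs 0 0)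
  rw [hc1]
  have hc4 : PySem.Int.floordiv ((xs.take (xs.length - 2)).sum * (xs.take (xs.length - 2)).sum
        - ((xs.take (xs.length - 2)).map (fun x => x * x)).sum) 2
      = ftPairs (xs.take (xs.length - 2)) := by
    rw [show (xs.take (xs.length - 2)).sum * (xs.take (xs.length - 2)).sum
        - ((xs.take (xs.length - 2)).map (fun x => x * x)).sum
        = 2 * ftPairs (xs.take (xs.length - 2)) by linarith [ft_two_mul_pairs (xs.take (xs.length - 2))]]
    exact ft_floordiv_two _
  rw [hc4, ft_sum4 xs hpre]
  by_cases e1 : ftExceeds n 0 ((xs.take (xs.length - 2)).sum + k2 + 1) 1 (PySem.List.pyGetD xs 0 0 - 1) = true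
  · simp only [if_pos e1]
    decide
  · simp only [if_neg e1]
    by_cases hp : ((xs.length : Int) - 2 > 2)
    · simp only [if_pos hp]
      have hlen5 : 5 ≤ xs.length := by omega
      rw [ft_slice_1_neg2_sum xs hlen5]
      have hc2 : (PySem.List.pyRange 0 (PySem.List.pyGetD xs 1 0) 1).any (fun i =>
          decide ((PySem.List.pyGetD xs 0 0 + i) *
              ((xs.take (xs.length - 2)).sum - PySem.List.pyGetD xs 0 0 - i)
              + i * PySem.List.pyGetD xs 0 0 + i > n))
          = ftExceeds n (PySem.List.pyGetD xs 0 0 *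
                ((xs.take (xs.length - 2)).sum - PySem.List.pyGetD xs 0 0))
              ((xs.take (xs.length - 2)).sum - PySem.List.pyGetD xs 0 0 + 1) 0
              (PySem.List.pyGetD xs 1 0 - 1) := by
        have harr : ∀ i : Int, ((PySem.List.pyGetD xs 0 0 + i) *
              ((xs.take (xs.length - 2)).sum - PySem.List.pyGetD xs 0 0 - i)
              + i * PySem.List.pyGetD xs 0 0 + i > n)
            = (PySem.List.pyGetD xs 0 0 * ((xs.take (xs.length - 2)).sum - PySem.List.pyGetD xs 0 0)
              + ((xs.take (xs.length - 2)).sum - PySem.List.pyGetD xs 0 0 + 1) * i - i * i > n) := by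
          intro i
          congr 1
          ring
        simp only [harr]
        exact ft_quad_any n _ _ 0 (PySem.List.pyGetD xs 1 0)
      rw [hc2]
      by_cases e2 : ftExceeds n (PySem.List.pyGetD xs 0 0 *
            ((xs.take (xs.length - 2)).sum - PySem.List.pyGetD xs 0 0))
          ((xs.take (xs.length - 2)).sum - PySem.List.pyGetD xs 0 0 + 1) 0
          (PySem.List.pyGetD xs 1 0 - 1) = true
      · simp only [if_pos e2]
        decide
      · simp only [if_neg e2]
        rw [ft_loop3_eq n xs hlen5 (xs.length - 5) 2 (by norm_num) (by omega)]
        have einit1 : (xs.take ((2 : Int) - 1).toNat).sum = PySem.List.pyGetD xs 0 0 := by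
          rw [show ((2 : Int) - 1).toNat = 1 by norm_num]
          cases xs with
          | nil => simp at hpre
          | cons y t => simp [PySem.List.pyGetD_zero_cons]
        have einit2 : ((xs.take ((2 : Int) - 1).toNat).map (fun x => x * x)).sum
            = PySem.List.pyGetD xs 0 0 * PySem.List.pyGetD xs 0 0 := by
          rw [show ((2 : Int) - 1).toNat = 1 by norm_num]
          cases xs with
          | nil => simp at hpre
          | cons y t => simp [PySem.List.pyGetD_zero_cons]
        rw [einit1, einit2]
        by_cases e3 : (ftLoop3 n (xs.take (xs.length - 2)).sum xs 2 ((xs.length : Int) - 2 - 1)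
            (false, PySem.List.pyGetD xs 0 0,
              PySem.List.pyGetD xs 0 0 * PySem.List.pyGetD xs 0 0)).1 = true
        · simp only [if_pos e3]
          decide
        · simp only [if_neg e3]
          by_cases e4 : ftPairs (xs.take (xs.length - 2)) + m > n
          · simp only [if_pos e4]
            decide
          · simp only [if_neg e4]
            rcases th with _ | t
            · show (true, ftCondA.items) = (true, ftCondB.items)
              decide
            · by_cases e5 : ex * (k1 + k2) > t
              · simp only [if_pos e5]
                decide
              · simp only [if_neg e5]
                decide
    · simp only [if_neg hp]
      by_cases e4 : ftPairs (xs.take (xs.length - 2)) + m > n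
      · simp only [if_pos e4]
        decide
      · simp only [if_neg e4]
        rcases th with _ | t
        · show (true, ftCondA.items) = (true, ftCondB.items)
          decide
        · by_cases e5 : ex * (k1 + k2) > t
          · simp only [if_pos e5]
            decide
          · simp only [if_neg e5]
            decide

-- ===== VERDICT (by name: the statement is the Claim_ definition above) =====
theorem filter_test_spec : Claim_equal_filter_test := by
  intro n m partition threshold exponent _hdom hpre
  unfold Pre_filter_test at hpre
  unfold Spec_filter_test
  exact ft_main n m partition threshold exponent hpre
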